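-- pv_equiv track=rewrite | github.com/v-mason-seo/beautiful-excel | core/smart_paste.py | flatten_headers
-- ===== SOURCE A (Python) =====
-- from typing import Dict, List, Optional, Tuple
--
-- def flatten_headers(header_rows: List[List[str]]) -> List[str]:
--     """
--     여러 행 헤더를 단일 문자열 키로 변환.
--     빈 셀(병합 셀)은 왼쪽 위 값을 이어받아 채움.
--
--     예:
--       ["서버 정보", "",    "네트워크"]
--       ["서버명",   "IP", "VLAN"    ]
--       → ["서버 정보/서버명", "서버 정보/IP", "네트워크/VLAN"]
--     """
--     if not header_rows:
--         return []
--     if len(header_rows) == 1: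
--         return [c.strip() for c in header_rows[0]]
--
--     num_cols = max(len(row) for row in header_rows)
--     filled_rows: List[List[str]] = []
--     for row in header_rows:
--         padded = list(row) + [""] * (num_cols - len(row))
--         filled, last = [], ""
--         for cell in padded:
--             val = cell.strip()
--             if val:
--                 last = val
--                 filled.append(val)
--             else:
--                 filled.append(last)
--         filled_rows.append(filled)
--
--     flat: List[str] = []
--     for col_idx in range(num_cols):
--         parts: List[str] = []
--         for row in filled_rows:
--             val = row[col_idx] if col_idx < len(row) else ""
--             if val and val not in parts:
--                 parts.append(val)
--         flat.append("/".join(parts))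
--     return flat
-- ===== SOURCE B (Python) =====
-- def flatten_headers(header_rows):
--     if not header_rows:
--         return []
--     if len(header_rows) == 1:
--         return [c.strip() for c in header_rows[0]]
--     num_cols = max(len(r) for r in header_rows)
--     parts = [[] for _ in range(num_cols)]
--     for row in header_rows:
--         last = ""
--         for col in range(num_cols):
--             cell = row[col] if col < len(row) else ""
--             val = cell.strip()
--             if val:
--                 last = val
--             p = parts[col]
--             if last and last not in p:
--                 p.append(last)
--     return ["/".join(p) for p in parts]
-- ===== Notes on version B (the rewrite author's own statement) =====
-- stated objective: alternative
-- what changed: B drops A's intermediate filled_rows grid and the second column-major pass: a single row-major pass forward-fills each row on the fly and appends directly into per-column part lists, then joins.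
import Mathlib
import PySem

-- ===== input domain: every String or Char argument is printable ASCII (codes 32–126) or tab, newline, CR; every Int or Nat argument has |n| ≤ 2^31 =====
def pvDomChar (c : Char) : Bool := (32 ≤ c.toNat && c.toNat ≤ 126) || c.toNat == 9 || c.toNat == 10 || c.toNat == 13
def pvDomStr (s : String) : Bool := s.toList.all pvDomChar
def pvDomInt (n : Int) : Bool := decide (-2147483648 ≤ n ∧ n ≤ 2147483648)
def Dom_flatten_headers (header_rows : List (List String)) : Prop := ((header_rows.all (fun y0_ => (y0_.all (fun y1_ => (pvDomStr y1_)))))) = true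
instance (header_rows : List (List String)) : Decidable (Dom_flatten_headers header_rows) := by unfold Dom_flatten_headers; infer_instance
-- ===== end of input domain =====

-- B fuses A's fill pass and column pass into one row-major traversal over per-column part lists (alternative decomposition, same cost).

-- ===== PORT A =====
def fillStep (st : List String × String) (cell : String) : List String × String :=
  let val := PySem.Str.strip cell
  if val ≠ "" then (st.1 ++ [val], val) else (st.1 ++ [st.2], st.2)

def fillRow (num_cols : Nat) (row : List String) : List String :=
  ((row ++ List.replicate (num_cols - row.length) "").foldl fillStep ([], "")).1

def colStep (col : Nat) (parts : List String) (row : List String) : List String :=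
  let val := if col < row.length then row.getD col "" else ""
  if val ≠ "" ∧ val ∉ parts then parts ++ [val] else parts

def flatten_headers (header_rows : List (List String)) : List String :=
  if header_rows = [] then []
  else if header_rows.length = 1 then (header_rows.getD 0 []).map PySem.Str.strip
  else
    let num_cols := (header_rows.map List.length).foldl max 0
    let filled_rows := header_rows.map (fillRow num_cols)
    (List.range num_cols).map (fun col =>
      PySem.Str.join "/" (filled_rows.foldl (colStep col) []))

-- ===== PORT B =====
def altInner (row : List String) (st : List (List String) × String) (col : Nat) :
    List (List String) × String :=
  let cell := if col < row.length then row.getD col "" else ""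
  let val := PySem.Str.strip cell
  let last := if val ≠ "" then val else st.2
  let p := st.1.getD col []
  (st.1.set col (if last ≠ "" ∧ last ∉ p then p ++ [last] else p), last)

def flatten_headers_alt (header_rows : List (List String)) : List String :=
  if header_rows = [] then []
  else if header_rows.length = 1 then (header_rows.getD 0 []).map PySem.Str.strip
  else
    let num_cols := (header_rows.map List.length).foldl max 0
    let parts := header_rows.foldl
      (fun parts row => ((List.range num_cols).foldl (altInner row) (parts, "")).1)
      (List.replicate num_cols ([] : List String))
    parts.map (PySem.Str.join "/")

-- ===== PRECONDITION & SPEC =====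
def Spec_flatten_headers (header_rows : List (List String)) (out : List String) : Prop := out = flatten_headers_alt header_rows
instance (header_rows : List (List String)) (out : List String) : Decidable (Spec_flatten_headers header_rows out) := by unfold Spec_flatten_headers; infer_instance

-- ===== CLAIM (what is proved, stated in full; the proofs are below) =====
def Claim_equal_flatten_headers : Prop := ∀ (header_rows : List (List String)), Dom_flatten_headers header_rows → Spec_flatten_headers header_rows (flatten_headers header_rows)

-- ===== LEMMAS AND PROOFS =====

-- one dedup-append step shared by both column accumulations
def updOne (p : List String) (v : String) : List String :=
  if v ≠ "" ∧ v ∉ p then p ++ [v] else p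

-- forward-filled values of a cell list starting from `last`
def fvals (last : String) : List String → List String
  | [] => []
  | c :: cs =>
    let v := PySem.Str.strip c
    let l := if v ≠ "" then v else last
    l :: fvals l cs

-- apply updOne with successive values at successive column positions
def applyUpds (parts : List (List String)) (i : Nat) : List String → List (List String)
  | [] => parts
  | v :: vs => applyUpds (parts.set i (updOne (parts.getD i []) v)) (i + 1) vs

def cellFn (row : List String) (col : Nat) : String :=
  if col < row.length then row.getD col "" else ""

theorem foldl_fillStep (cells : List String) :
    ∀ acc last, (cells.foldl fillStep (acc, last)).1 = acc ++ fvals last cells := by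
  induction cells with
  | nil => intro acc last; simp [fvals]
  | cons c cs ih =>
    intro acc last
    simp only [List.foldl_cons, fvals]
    by_cases h : PySem.Str.strip c ≠ "" <;> simp [fillStep, h, ih]

theorem length_fvals (cells : List String) : ∀ last, (fvals last cells).length = cells.length := by
  induction cells with
  | nil => intro last; rfl
  | cons c cs ih => intro last; simp [fvals, ih]

theorem fillRow_eq (n : Nat) (row : List String) :
    fillRow n row = fvals "" (row ++ List.replicate (n - row.length) "") := by
  rw [fillRow, foldl_fillStep, List.nil_append]

theorem length_fillRow (n : Nat) (row : List String) (h : row.length ≤ n) :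
    (fillRow n row).length = n := by
  rw [fillRow_eq, length_fvals]; simp; omega

theorem getD_set_ne (l : List (List String)) (i col : Nat) (v : List String) (h : col ≠ i) :
    (l.set i v).getD col [] = l.getD col [] := by
  simp [List.getD_eq_getElem?_getD, List.getElem?_set_ne (by omega : i ≠ col)]

theorem getD_set_self (l : List (List String)) (i : Nat) (v : List String) (h : i < l.length) :
    (l.set i v).getD i [] = v := by
  simp [List.getD_eq_getElem?_getD, h]

theorem map_cellFn (row : List String) (n : Nat) (h : row.length ≤ n) :
    (List.range n).map (cellFn row) = row ++ List.replicate (n - row.length) "" := by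
  apply List.ext_getElem
  · simp; omega
  · intro i h1 h2
    simp only [List.getElem_map, List.getElem_range, cellFn]
    simp only [List.length_map, List.length_range] at h1
    by_cases hi : i < row.length
    · simp [hi, List.getElem_append_left hi, List.getD_eq_getElem?_getD]
    · simp [hi, List.getElem_append_right (Nat.le_of_not_lt hi)]

theorem foldl_altInner (row : List String) (k : Nat) :
    ∀ s parts last,
      ((List.range' s k).foldl (altInner row) (parts, last)).1
        = applyUpds parts s (fvals last ((List.range' s k).map (cellFn row))) := by
  induction k with
  | zero => intro s parts last; simp [applyUpds, fvals]
  | succ k ih =>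
    intro s parts last
    rw [List.range'_succ]
    simp only [List.foldl_cons, List.map_cons, fvals]
    rw [ih]
    simp only [altInner, cellFn, applyUpds, updOne]

theorem length_applyUpds (vs : List String) :
    ∀ parts i, (applyUpds parts i vs).length = parts.length := by
  induction vs with
  | nil => intro parts i; rfl
  | cons v vs ih => intro parts i; simp [applyUpds, ih]

theorem getD_applyUpds (vs : List String) :
    ∀ parts i col, i + vs.length ≤ parts.length →
      (applyUpds parts i vs).getD col []
        = if i ≤ col ∧ col < i + vs.length then updOne (parts.getD col []) (vs.getD (col - i) "")
          else parts.getD col [] := by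
  induction vs with
  | nil =>
    intro parts i col _
    simp [applyUpds]
  | cons v vs ih =>
    intro parts i col hle
    simp only [applyUpds]
    have hle' : (i + 1) + vs.length ≤ (parts.set i (updOne (parts.getD i []) v)).length := by
      simp only [List.length_set, List.length_cons] at hle ⊢; omega
    rw [ih _ _ _ hle']
    have hset : (parts.set i (updOne (parts.getD i []) v)).length = parts.length := by simp
    split_ifs with h1 h2 h2
    · -- i+1 ≤ col < i+1+vs.length; also inside outer range
      have hne : col ≠ i := by omega
      rw [getD_set_ne _ _ _ _ hne]
      have : (v :: vs).getD (col - i) "" = vs.getD (col - (i + 1)) "" := by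
        have hstep : col - i = (col - (i + 1)) + 1 := by omega
        rw [hstep]; rfl
      rw [this]
    · exfalso; simp at h2; omega
    · -- outer range holds, inner does not: col = i
      have hcol : col = i := by simp at h1 h2; omega
      subst hcol
      have hi : col < parts.length := by simp at hle; omega
      rw [getD_set_self _ _ _ hi]
      simp
    · have hne : col ≠ i := by
        intro h; subst h
        simp only [List.length_cons] at h2; omega
      rw [getD_set_ne _ _ _ _ hne]

theorem length_foldl_applyUpds (F : List (List String)) :
    ∀ parts, (F.foldl (fun p f => applyUpds p 0 f) parts).length = parts.length := by
  induction F with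
  | nil => intro parts; rfl
  | cons f F ih => intro parts; simp [ih, length_applyUpds]

theorem getD_foldl_applyUpds (n : Nat) (F : List (List String)) :
    ∀ parts col, (∀ f ∈ F, f.length = n) → parts.length = n → col < n →
      (F.foldl (fun p f => applyUpds p 0 f) parts).getD col []
        = F.foldl (fun p f => updOne p (f.getD col "")) (parts.getD col []) := by
  induction F with
  | nil => intro parts col _ _ _; rfl
  | cons f F ih =>
    intro parts col hlen hp hc
    simp only [List.foldl_cons]
    rw [ih _ _ (fun g hg => hlen g (List.mem_cons_of_mem _ hg))
        (by rw [length_applyUpds]; exact hp)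
        hc]
    congr 1
    rw [getD_applyUpds]
    · have hf : f.length = n := hlen f List.mem_cons_self
      simp [hf, hc]
    · have hf : f.length = n := hlen f List.mem_cons_self
      omega

theorem foldl_colStep_eq (n col : Nat) (F : List (List String)) :
    ∀ init, (∀ f ∈ F, f.length = n) → col < n →
      F.foldl (colStep col) init = F.foldl (fun p f => updOne p (f.getD col "")) init := by
  induction F with
  | nil => intro init _ _; rfl
  | cons f F ih =>
    intro init hlen hc
    simp only [List.foldl_cons]
    have hf : f.length = n := hlen f List.mem_cons_self
    have : colStep col init f = updOne init (f.getD col "") := by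
      simp [colStep, updOne, hf, hc]
    rw [this, ih _ (fun g hg => hlen g (List.mem_cons_of_mem _ hg)) hc]

theorem foldl_max_init (l : List Nat) : ∀ a : Nat, a ≤ l.foldl max a := by
  induction l with
  | nil => intro a; simp
  | cons y l ih => intro a; exact le_trans (le_max_left a y) (ih _)

theorem mem_le_foldl_max (l : List Nat) : ∀ a x, x ∈ l → x ≤ l.foldl max a := by
  induction l with
  | nil => intro _ _ h; cases h
  | cons y l ih =>
    intro a x h
    rcases List.mem_cons.mp h with rfl | h'
    · exact le_trans (le_max_right a x) (foldl_max_init l _)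
    · exact ih _ _ h'

theorem len_le_num_cols (L : List (List String)) (row : List String) (h : row ∈ L) :
    row.length ≤ (L.map List.length).foldl max 0 :=
  mem_le_foldl_max _ _ _ (List.mem_map_of_mem h)

theorem foldl_congr_mem' {α β : Type} (l : List α) (f g : β → α → β) :
    ∀ init, (∀ b a, a ∈ l → f b a = g b a) → l.foldl f init = l.foldl g init := by
  induction l with
  | nil => intro init _; rfl
  | cons x l ih =>
    intro init h
    simp only [List.foldl_cons]
    rw [h init x List.mem_cons_self, ih _ (fun b a ha => h b a (List.mem_cons_of_mem _ ha))]

-- ===== VERDICT (by name: the statement is the Claim_ definition above) =====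
theorem rowStep_eq (n : Nat) (row : List String) (parts : List (List String))
    (h : row.length ≤ n) :
    ((List.range n).foldl (altInner row) (parts, "")).1 = applyUpds parts 0 (fillRow n row) := by
  rw [List.range_eq_range', foldl_altInner, ← List.range_eq_range', map_cellFn row n h,
      fillRow_eq]

theorem flatten_headers_spec : Claim_equal_flatten_headers := by
  intro header_rows _
  unfold Spec_flatten_headers flatten_headers flatten_headers_alt
  by_cases h0 : header_rows = []
  · simp [h0]
  · by_cases h1 : header_rows.length = 1
    · simp [h0, h1]
    · simp only [h0, h1, if_false]
      set n := (header_rows.map List.length).foldl max 0 with hn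
      have hrows : ∀ row ∈ header_rows, row.length ≤ n := by
        intro row hr; exact len_le_num_cols _ _ hr
      -- B's row fold works on filled rows
      have hB : header_rows.foldl
          (fun parts row => ((List.range n).foldl (altInner row) (parts, "")).1)
          (List.replicate n ([] : List String))
          = (header_rows.map (fillRow n)).foldl (fun p f => applyUpds p 0 f)
              (List.replicate n ([] : List String)) := by
        rw [List.foldl_map]
        exact foldl_congr_mem' _ _ _ _
          (fun parts row hr => rowStep_eq n row parts (hrows row hr))
      rw [hB]
      set F := header_rows.map (fillRow n) with hF
      have hFlen : ∀ f ∈ F, f.length = n := by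
        intro f hf
        rcases List.mem_map.mp hf with ⟨row, hr, rfl⟩
        exact length_fillRow n row (hrows row hr)
      apply List.ext_getElem
      · simp [length_foldl_applyUpds]
      · intro col hc1 hc2
        simp only [List.getElem_map, List.getElem_range]
        simp only [List.length_map, List.length_range] at hc1
        congr 1
        have hlen : (F.foldl (fun p f => applyUpds p 0 f)
            (List.replicate n ([] : List String))).length = n := by
          simp [length_foldl_applyUpds]
        have hgetD : (F.foldl (fun p f => applyUpds p 0 f)
              (List.replicate n ([] : List String))).getD col []
            = F.foldl (fun p f => updOne p (f.getD col "")) [] := by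
          rw [getD_foldl_applyUpds n F _ col hFlen (by simp) hc1]
          congr 1
          simp [List.getD_eq_getElem?_getD, hc1]
        rw [foldl_colStep_eq n col F [] hFlen hc1, ← hgetD,
            List.getD_eq_getElem?_getD, List.getElem?_eq_getElem (by omega)]
        rfl
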